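-- pv_equiv track=rewrite | github.com/Luiss1715/-Implementacion_algoritmo_ML_libreria | modelo_con_libreria.py | _fit_one_hot_maps
-- ===== SOURCE A (Python) =====
-- def _fit_one_hot_maps(rows, categorical_cols):
--     """
--     Para cada columna categorica, junta el conjunto de categorias observadas
--     y crea el mapeo de nombres de columnas one-hot resultantes
--     """
--     cat_values = {c: [] for c in categorical_cols}
--     seen = {c: set() for c in categorical_cols}
--     for r in rows:
--         for c in categorical_cols:
--             v = r[c]
--             if v not in seen[c]:
--                 seen[c].add(v)
--                 cat_values[c].append(v)
--     # genera nombres de columnas one-hot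
--     one_hot_cols = []
--     for c in categorical_cols:
--         for v in cat_values[c]:
--             one_hot_cols.append(f"{c}__{v}")
--     return cat_values, one_hot_cols
-- ===== SOURCE B (Python) =====
-- def _fit_one_hot_maps(rows, categorical_cols):
--     # One global ordered dedup over the flattened (column, value) pair stream,
--     # then partition the unique pairs per column; no per-column seen-sets.
--     pairs = list(dict.fromkeys((c, r[c]) for r in rows for c in categorical_cols))
--     cat_values = {c: [v for c2, v in pairs if c2 == c] for c in categorical_cols}
--     one_hot_cols = [f"{c}__{v}" for c in categorical_cols for v in cat_values[c]]
--     return cat_values, one_hot_cols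
-- ===== Notes on version B (the rewrite author's own statement) =====
-- stated objective: alternative
-- what changed: Instead of per-column seen-set bookkeeping while scanning rows, B flattens the table into one (column, value) pair stream, performs a single global ordered dedup over the pairs, and then partitions the unique pairs per column by filtering; the one-hot names become one flat comprehension.
import Mathlib
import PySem

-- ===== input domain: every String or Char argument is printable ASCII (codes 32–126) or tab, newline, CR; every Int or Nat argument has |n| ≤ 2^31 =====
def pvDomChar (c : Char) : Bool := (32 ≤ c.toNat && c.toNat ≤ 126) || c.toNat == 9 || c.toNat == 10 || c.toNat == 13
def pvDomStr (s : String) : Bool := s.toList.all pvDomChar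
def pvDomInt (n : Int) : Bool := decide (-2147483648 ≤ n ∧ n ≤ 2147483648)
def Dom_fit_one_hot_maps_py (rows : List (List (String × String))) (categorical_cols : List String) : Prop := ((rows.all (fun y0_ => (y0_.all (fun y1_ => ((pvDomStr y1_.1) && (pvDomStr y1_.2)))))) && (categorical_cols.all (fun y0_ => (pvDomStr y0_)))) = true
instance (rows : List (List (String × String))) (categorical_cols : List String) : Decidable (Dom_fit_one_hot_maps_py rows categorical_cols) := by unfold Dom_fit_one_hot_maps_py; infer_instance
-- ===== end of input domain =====

-- B replaces per-column seen-set bookkeeping by one global ordered dedup of the flattened (column, value) pair stream, then partitions the unique pairs per column; objective: alternative.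


-- f"{c}__{v}" (shared by both ports)
def oneHotName (c v : String) : String := c ++ "__" ++ v

-- r[c]: first-match lookup in the association list; Pre_ excludes the KeyError case (missing key), so the "" default is never reached on admitted inputs
def pyLookup (r : List (String × String)) (c : String) : String :=
  (PySem.Dict.mk r).getD c ""

-- ===== PORT A =====
def fit_one_hot_maps_py (rows : List (List (String × String))) (categorical_cols : List String) : (List (String × List String)) × List String :=
  let cat_values : PySem.Dict String (List String) :=
    categorical_cols.foldl (fun d c => d.insert c []) PySem.Dict.empty
  let seen : PySem.Dict String (PySem.Set String) :=
    categorical_cols.foldl (fun d c => d.insert c PySem.Set.empty) PySem.Dict.empty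
  let st := rows.foldl (fun st r =>
      categorical_cols.foldl (fun st c =>
        let v := pyLookup r c
        if PySem.Set.contains (st.2.getD c PySem.Set.empty) v then st
        else (st.1.modify c [] (fun l => l ++ [v]),
              st.2.modify c PySem.Set.empty (fun s => PySem.Set.add s v))
      ) st) (cat_values, seen)
  let one_hot_cols := categorical_cols.foldl (fun acc c =>
      (st.1.getD c []).foldl (fun acc v => acc ++ [oneHotName c v]) acc) []
  (st.1.items, one_hot_cols)

-- ===== PORT B =====
def fit_one_hot_maps_py_alt (rows : List (List (String × String))) (categorical_cols : List String) : (List (String × List String)) × List String :=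
  let pairs := PySem.List.dedup (rows.flatMap (fun r => categorical_cols.map (fun c => (c, pyLookup r c))))
  let cat_values : PySem.Dict String (List String) :=
    categorical_cols.foldl (fun d c =>
      d.insert c ((pairs.filter (fun p => p.1 == c)).map Prod.snd)) PySem.Dict.empty
  let one_hot_cols := categorical_cols.flatMap (fun c => (cat_values.getD c []).map (fun v => oneHotName c v))
  (cat_values.items, one_hot_cols)

-- ===== PRECONDITION & SPEC =====
-- Pre_ excludes exactly the inputs where Python A raises KeyError: some categorical column missing from some row.
def Pre_fit_one_hot_maps_py (rows : List (List (String × String))) (categorical_cols : List String) : Prop :=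
  ∀ r ∈ rows, ∀ c ∈ categorical_cols, c ∈ r.map Prod.fst
instance (rows : List (List (String × String))) (categorical_cols : List String) : Decidable (Pre_fit_one_hot_maps_py rows categorical_cols) := by unfold Pre_fit_one_hot_maps_py; infer_instance

def pvWitness_fit_one_hot_maps_py : (List (List (String × String))) × List String :=
  ([[("col", "a")], [("col", "b")]], ["col"])

def Spec_fit_one_hot_maps_py (rows : List (List (String × String))) (categorical_cols : List String) (out : (List (String × List String)) × List String) : Prop := out = fit_one_hot_maps_py_alt rows categorical_cols
instance (rows : List (List (String × String))) (categorical_cols : List String) (out : (List (String × List String)) × List String) : Decidable (Spec_fit_one_hot_maps_py rows categorical_cols out) := by unfold Spec_fit_one_hot_maps_py; infer_instance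

-- ===== CLAIM (what is proved, stated in full; the proofs are below) =====
def Claim_equal_fit_one_hot_maps_py : Prop := ∀ (rows : List (List (String × String))) (categorical_cols : List String), Dom_fit_one_hot_maps_py rows categorical_cols → Pre_fit_one_hot_maps_py rows categorical_cols → Spec_fit_one_hot_maps_py rows categorical_cols (fit_one_hot_maps_py rows categorical_cols)

-- ===== LEMMAS AND PROOFS =====

-- A's inner-loop body (definitionally equal to the port's inline lambda; Set.empty = [])
def stA (r : List (String × String))
    (st : PySem.Dict String (List String) × PySem.Dict String (List String)) (c : String) :
    PySem.Dict String (List String) × PySem.Dict String (List String) :=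
  if List.contains (st.2.getD c []) (pyLookup r c) then st
  else (st.1.modify c [] (fun l => l ++ [pyLookup r c]),
        st.2.modify c [] (fun s => PySem.Set.add s (pyLookup r c)))

def catInit (cols : List String) : PySem.Dict String (List String) :=
  List.foldl (fun d c => d.insert c []) PySem.Dict.empty cols

def dictA (rows : List (List (String × String))) (cols : List String) : PySem.Dict String (List String) :=
  (List.foldl (fun st r => List.foldl (stA r) st cols) (catInit cols, catInit cols) rows).1

-- B's flattened (column, value) pair stream
def pairsL (rows : List (List (String × String))) (cols : List String) : List (String × String) :=
  rows.flatMap (fun r => cols.map (fun c => (c, pyLookup r c)))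

def dictB (rows : List (List (String × String))) (cols : List String) : PySem.Dict String (List String) :=
  List.foldl (fun d c =>
    d.insert c (((PySem.List.dedup (pairsL rows cols)).filter (fun p => p.1 == c)).map Prod.snd))
    PySem.Dict.empty cols

theorem stA_getD (r : List (String × String))
    (st : PySem.Dict String (List String) × PySem.Dict String (List String)) (c0 : String)
    (hinv : ∀ c, st.2.getD c [] = st.1.getD c []) :
    (∀ c, (stA r st c0).2.getD c [] = (stA r st c0).1.getD c []) ∧
    (∀ c, (stA r st c0).1.getD c [] =
      if c = c0 then PySem.Set.add (st.1.getD c0 []) (pyLookup r c0) else st.1.getD c []) := by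
  by_cases h : (st.2.getD c0 []).contains (pyLookup r c0) = true
  · have hmem : pyLookup r c0 ∈ st.1.getD c0 [] := by
      rw [hinv c0] at h; simpa using h
    rw [stA, if_pos h]
    refine ⟨hinv, fun c => ?_⟩
    split
    · next hc => subst hc; simp [PySem.Set.add, PySem.Set.contains, hmem]
    · rfl
  · have hmem : pyLookup r c0 ∉ st.1.getD c0 [] := by
      rw [hinv c0] at h; simpa using h
    rw [stA, if_neg h]
    constructor
    · intro c
      rw [PySem.Dict.getD_modify, PySem.Dict.getD_modify]
      split
      · next hc => rw [hinv c0]; simp [PySem.Set.add, PySem.Set.contains, hmem]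
      · exact hinv c
    · intro c
      rw [PySem.Dict.getD_modify]
      split
      · next hc => simp [PySem.Set.add, PySem.Set.contains, hmem]
      · rfl

theorem innerA_getD (r : List (String × String)) (cols : List String)
    (st : PySem.Dict String (List String) × PySem.Dict String (List String))
    (hinv : ∀ c, st.2.getD c [] = st.1.getD c []) :
    (∀ c, (List.foldl (stA r) st cols).2.getD c [] = (List.foldl (stA r) st cols).1.getD c []) ∧
    (∀ c, (List.foldl (stA r) st cols).1.getD c [] =
      if c ∈ cols then PySem.Set.add (st.1.getD c []) (pyLookup r c) else st.1.getD c []) := by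
  induction cols generalizing st with
  | nil => exact ⟨hinv, fun c => by simp⟩
  | cons c0 t ih =>
    obtain ⟨h1, h2⟩ := stA_getD r st c0 hinv
    obtain ⟨ih1, ih2⟩ := ih (stA r st c0) h1
    refine ⟨?_, ?_⟩ <;> simp only [List.foldl_cons]
    · exact ih1
    · intro c
      rw [ih2 c, h2 c]
      by_cases hcc : c = c0
      · subst hcc
        by_cases hct : c ∈ t
        · simp [hct]
        · simp [hct]
      · by_cases hct : c ∈ t <;> simp [hct, hcc]

theorem outerA_getD (rows : List (List (String × String))) (cols : List String)
    (st : PySem.Dict String (List String) × PySem.Dict String (List String))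
    (hinv : ∀ c, st.2.getD c [] = st.1.getD c []) (c : String) :
    (List.foldl (fun st r => List.foldl (stA r) st cols) st rows).1.getD c [] =
      if c ∈ cols then
        List.foldl PySem.Set.add (st.1.getD c []) (rows.map (fun r => pyLookup r c))
      else st.1.getD c [] := by
  induction rows generalizing st with
  | nil => simp
  | cons r rs ih =>
    obtain ⟨h1, h2⟩ := innerA_getD r cols st hinv
    rw [List.foldl_cons, ih _ h1, h2 c]
    by_cases hc : c ∈ cols <;> simp [hc]

theorem stA_keys (r : List (String × String))
    (st : PySem.Dict String (List String) × PySem.Dict String (List String)) (c0 : String)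
    (h : st.1.contains c0 = true) : (stA r st c0).1.keys = st.1.keys := by
  unfold stA
  split
  · rfl
  · show (st.1.modify c0 [] fun l => l ++ [pyLookup r c0]).keys = st.1.keys
    rw [PySem.Dict.keys_modify, PySem.Dict.keys_insert_of_contains _ _ h]

theorem innerA_keys (r : List (String × String)) (cols : List String)
    (st : PySem.Dict String (List String) × PySem.Dict String (List String))
    (h : ∀ c ∈ cols, c ∈ st.1.keys) : (List.foldl (stA r) st cols).1.keys = st.1.keys := by
  induction cols generalizing st with
  | nil => rfl
  | cons c0 t ih =>
    have hc0 : st.1.contains c0 = true :=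
      (PySem.Dict.contains_iff_mem_keys _ _).2 (h c0 (List.mem_cons_self ..))
    have hk := stA_keys r st c0 hc0
    rw [List.foldl_cons, ih (stA r st c0) (fun c hc => hk ▸ h c (List.mem_cons_of_mem _ hc)), hk]

theorem outerA_keys (rows : List (List (String × String))) (cols : List String)
    (st : PySem.Dict String (List String) × PySem.Dict String (List String))
    (h : ∀ c ∈ cols, c ∈ st.1.keys) :
    (List.foldl (fun st r => List.foldl (stA r) st cols) st rows).1.keys = st.1.keys := by
  induction rows generalizing st with
  | nil => rfl
  | cons r rs ih =>
    have hk := innerA_keys r cols st h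
    rw [List.foldl_cons, ih _ (fun c hc => hk ▸ h c hc), hk]

theorem foldl_insert_getD (cols : List String) (g : String → List String)
    (d : PySem.Dict String (List String)) (c : String) :
    (List.foldl (fun d c => d.insert c (g c)) d cols).getD c [] =
      if c ∈ cols then g c else d.getD c [] := by
  induction cols generalizing d with
  | nil => simp
  | cons c0 t ih =>
    rw [List.foldl_cons, ih]
    by_cases hct : c ∈ t <;> by_cases hcc : c = c0 <;>
      simp [hct, hcc, PySem.Dict.getD_insert]

theorem foldl_insert_keys (cols : List String) (g : String → List String)
    (d : PySem.Dict String (List String)) :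
    (List.foldl (fun d c => d.insert c (g c)) d cols).keys = PySem.Set.update d.keys cols :=
  PySem.Dict.keys_foldl_insert cols (fun _ c => g c) d

theorem update_empty_set (cols : List String) :
    PySem.Set.update ([] : PySem.Set String) cols = PySem.Set.ofList cols := by
  rw [PySem.Set.ofList_eq_foldl]; rfl

theorem catInit_getD (cols : List String) (c : String) : (catInit cols).getD c [] = [] := by
  unfold catInit
  rw [foldl_insert_getD cols (fun _ => []) PySem.Dict.empty c]
  split <;> simp [PySem.Dict.getD_empty]

theorem catInit_keys (cols : List String) : (catInit cols).keys = PySem.Set.ofList cols := by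
  unfold catInit
  rw [foldl_insert_keys cols (fun _ => []) PySem.Dict.empty]
  simp [PySem.Dict.keys_empty, update_empty_set]

theorem dictA_getD (rows : List (List (String × String))) (cols : List String) (c : String) :
    (dictA rows cols).getD c [] =
      if c ∈ cols then PySem.List.dedup (rows.map (fun r => pyLookup r c)) else [] := by
  unfold dictA
  rw [outerA_getD rows cols _ (fun c => by simp [catInit_getD]) c]
  simp only [catInit_getD]
  rw [PySem.List.dedup_eq_ofList, PySem.Set.ofList_eq_foldl]

theorem dictA_keys (rows : List (List (String × String))) (cols : List String) :
    (dictA rows cols).keys = PySem.Set.ofList cols := by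
  unfold dictA
  rw [outerA_keys rows cols _ (fun c hc => by
    rw [catInit_keys]; exact (PySem.Set.mem_ofList cols c).2 hc), catInit_keys]

-- ===== B-side lemmas: the filtered global pair-dedup is the per-column ordered dedup =====

-- projecting the c-column out of an add of a pair
theorem snd_filter_add (s : List (String × String)) (p : String × String) (c : String) :
    ((PySem.Set.add s p).filter (fun q => q.1 == c)).map Prod.snd =
      if p.1 == c then PySem.Set.add ((s.filter (fun q => q.1 == c)).map Prod.snd) p.2
      else (s.filter (fun q => q.1 == c)).map Prod.snd := by
  have hmemI : p.2 ∈ (s.filter (fun q => q.1 == c)).map Prod.snd ↔ (p.1 = c ∧ p ∈ s) ∨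
      (∃ q ∈ s, q.1 = c ∧ q.2 = p.2) := by
    constructor
    · intro h
      obtain ⟨q, hq, hq2⟩ := List.mem_map.1 h
      obtain ⟨hqs, hqc⟩ := List.mem_filter.1 hq
      exact Or.inr ⟨q, hqs, by simpa using hqc, hq2⟩
    · rintro (⟨h1, h2⟩ | ⟨q, hqs, hq1, hq2⟩)
      · exact List.mem_map.2 ⟨p, List.mem_filter.2 ⟨h2, by simp [h1]⟩, rfl⟩
      · exact List.mem_map.2 ⟨q, List.mem_filter.2 ⟨hqs, by simp [hq1]⟩, hq2⟩
  rw [PySem.Set.add_eq_ite]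
  by_cases hps : p ∈ s
  · rw [if_pos hps]
    by_cases hpc : p.1 = c
    · have : p.2 ∈ (s.filter (fun q => q.1 == c)).map Prod.snd :=
        hmemI.2 (Or.inl ⟨hpc, hps⟩)
      rw [if_pos (by simp [hpc]), PySem.Set.add_of_mem this]
    · rw [if_neg (by simp [hpc])]
  · rw [if_neg hps, List.filter_append, List.map_append]
    by_cases hpc : p.1 = c
    · have hnm : p.2 ∉ (s.filter (fun q => q.1 == c)).map Prod.snd := by
        intro h
        rcases hmemI.1 h with ⟨_, h2⟩ | ⟨q, hqs, hq1, hq2⟩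
        · exact hps h2
        · exact hps (by
            have : q = p := Prod.ext (hq1.trans hpc.symm) hq2
            exact this ▸ hqs)
      rw [if_pos (by simp [hpc]), PySem.Set.add_of_not_mem hnm]
      simp [hpc]
    · rw [if_neg (by simp [hpc])]
      simp [hpc]

theorem snd_filter_update (ps : List (String × String)) (s : List (String × String)) (c : String) :
    ((PySem.Set.update s ps).filter (fun q => q.1 == c)).map Prod.snd =
      PySem.Set.update ((s.filter (fun q => q.1 == c)).map Prod.snd)
        ((ps.filter (fun q => q.1 == c)).map Prod.snd) := by
  induction ps generalizing s with
  | nil => rfl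
  | cons p t ih =>
    rw [PySem.Set.update_cons, ih, snd_filter_add]
    by_cases hpc : p.1 = c
    · rw [if_pos (by simp [hpc])]
      simp only [List.filter_cons, if_pos (show (p.1 == c) = true by simp [hpc])]
      rw [List.map_cons, PySem.Set.update_cons]
    · rw [if_neg (by simp [hpc])]
      simp only [List.filter_cons, if_neg (show ¬(p.1 == c) = true by simp [hpc])]

theorem snd_filter_ofList (ps : List (String × String)) (c : String) :
    ((PySem.Set.ofList ps).filter (fun q => q.1 == c)).map Prod.snd =
      PySem.Set.ofList ((ps.filter (fun q => q.1 == c)).map Prod.snd) := by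
  rw [← PySem.Set.update_nil_left ps, snd_filter_update]
  simp only [List.filter_nil, List.map_nil, PySem.Set.update_nil_left]

theorem update_replicate_of_mem {x : String} (s : PySem.Set String) (m : Nat) (h : x ∈ s) :
    PySem.Set.update s (List.replicate m x) = s := by
  induction m with
  | zero => rfl
  | succ k ih => rw [List.replicate_succ, PySem.Set.update_cons, PySem.Set.add_of_mem h, ih]

theorem update_replicate_succ (s : PySem.Set String) (m : Nat) (x : String) :
    PySem.Set.update s (List.replicate (m + 1) x) = PySem.Set.add s x := by
  rw [List.replicate_succ, PySem.Set.update_cons,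
    update_replicate_of_mem _ m ((PySem.Set.mem_add s x x).2 (Or.inr rfl))]

theorem update_flatMap_replicate (rows : List (List (String × String))) (g : List (String × String) → String)
    (n : Nat) (hn : 0 < n) (s : PySem.Set String) :
    PySem.Set.update s (rows.flatMap (fun r => List.replicate n (g r))) =
      PySem.Set.update s (rows.map g) := by
  induction rows generalizing s with
  | nil => rfl
  | cons r t ih =>
    obtain ⟨m, rfl⟩ : ∃ m, n = m + 1 := ⟨n - 1, by omega⟩
    rw [List.flatMap_cons, PySem.Set.update_append, update_replicate_succ, List.map_cons,
      PySem.Set.update_cons, ih]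

theorem pairs_filter_row (r : List (String × String)) (cols : List String) (c : String) :
    ((cols.map (fun c' => (c', pyLookup r c'))).filter (fun q => q.1 == c)).map Prod.snd =
      List.replicate (cols.count c) (pyLookup r c) := by
  induction cols with
  | nil => rfl
  | cons c0 t ih =>
    rw [List.map_cons, List.filter_cons, List.count_cons]
    by_cases hc : c0 = c
    · subst hc
      rw [if_pos (show (c0 == c0) = true from by simp),
          if_pos (show (c0 == c0) = true from by simp), List.map_cons, ih]
      simp [List.replicate_succ]
    · rw [if_neg (show ¬(c0 == c) = true from by simp [hc]),
          if_neg (show ¬(c0 == c) = true from by simp [hc]), ih]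
      simp

theorem dictB_col (rows : List (List (String × String))) (cols : List String) (c : String)
    (hc : c ∈ cols) :
    ((PySem.List.dedup (pairsL rows cols)).filter (fun q => q.1 == c)).map Prod.snd =
      PySem.List.dedup (rows.map (fun r => pyLookup r c)) := by
  rw [PySem.List.dedup_eq_ofList, PySem.List.dedup_eq_ofList, snd_filter_ofList]
  unfold pairsL
  have hfm : ((rows.flatMap (fun r => cols.map (fun c' => (c', pyLookup r c')))).filter
        (fun q => q.1 == c)).map Prod.snd =
      rows.flatMap (fun r => List.replicate (cols.count c) (pyLookup r c)) := by
    induction rows with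
    | nil => rfl
    | cons r t ih =>
      rw [List.flatMap_cons, List.filter_append, List.map_append, ih, pairs_filter_row,
        List.flatMap_cons]
  rw [hfm, ← PySem.Set.update_nil_left, ← PySem.Set.update_nil_left (rows.map _),
    update_flatMap_replicate rows _ (cols.count c) (List.count_pos_iff.2 hc)]

theorem dictB_getD (rows : List (List (String × String))) (cols : List String) (c : String) :
    (dictB rows cols).getD c [] =
      if c ∈ cols then PySem.List.dedup (rows.map (fun r => pyLookup r c)) else [] := by
  unfold dictB
  rw [foldl_insert_getD cols
    (fun c => ((PySem.List.dedup (pairsL rows cols)).filter (fun p => p.1 == c)).map Prod.snd)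
    PySem.Dict.empty c]
  by_cases hc : c ∈ cols
  · rw [if_pos hc, if_pos hc, dictB_col rows cols c hc]
  · rw [if_neg hc, if_neg hc]
    simp [PySem.Dict.getD_empty]

theorem dictB_keys (rows : List (List (String × String))) (cols : List String) :
    (dictB rows cols).keys = PySem.Set.ofList cols := by
  unfold dictB
  rw [foldl_insert_keys cols
    (fun c => ((PySem.List.dedup (pairsL rows cols)).filter (fun p => p.1 == c)).map Prod.snd)
    PySem.Dict.empty]
  simp [PySem.Dict.keys_empty, update_empty_set]

theorem dict_eq (rows : List (List (String × String))) (cols : List String) :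
    dictA rows cols = dictB rows cols := by
  apply PySem.Dict.ext
  rw [PySem.Dict.items_eq_map_keys (dictA rows cols)
        (by rw [dictA_keys]; exact PySem.Set.nodup_ofList cols) [],
      PySem.Dict.items_eq_map_keys (dictB rows cols)
        (by rw [dictB_keys]; exact PySem.Set.nodup_ofList cols) [],
      dictA_keys, dictB_keys]
  apply List.map_congr_left
  intro k hk
  rw [dictA_getD, dictB_getD]

theorem onehot_eq (rows : List (List (String × String))) (cols : List String) :
    List.foldl (fun acc c =>
        List.foldl (fun acc v => acc ++ [oneHotName c v]) acc ((dictA rows cols).getD c [])) [] cols =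
      List.flatMap (fun c => ((dictB rows cols).getD c []).map (fun v => oneHotName c v)) cols := by
  rw [dict_eq]
  rw [PySem.List.foldl_congr_mem cols _
      (fun acc c => acc ++ ((dictB rows cols).getD c []).map (fun v => oneHotName c v)) []
      (fun acc c _ => PySem.List.foldl_append_singleton_eq_map (oneHotName c) _ acc)]
  rw [PySem.List.foldl_append_eq_flatMap]
  rfl

-- ===== VERDICT (by name: the statement is the Claim_ definition above) =====
theorem fit_one_hot_maps_py_spec : Claim_equal_fit_one_hot_maps_py := by
  intro rows cols _ _
  unfold Spec_fit_one_hot_maps_py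
  have h1 : (fit_one_hot_maps_py rows cols).1 = (fit_one_hot_maps_py_alt rows cols).1 := by
    show (dictA rows cols).items = (dictB rows cols).items
    rw [dict_eq]
  have h2 : (fit_one_hot_maps_py rows cols).2 = (fit_one_hot_maps_py_alt rows cols).2 := by
    show List.foldl (fun acc c =>
        List.foldl (fun acc v => acc ++ [oneHotName c v]) acc ((dictA rows cols).getD c [])) [] cols =
      List.flatMap (fun c => ((dictB rows cols).getD c []).map (fun v => oneHotName c v)) cols
    exact onehot_eq rows cols
  exact Prod.ext h1 h2
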